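-- pv_equiv track=rewrite | github.com/Jlkun/myalgorithm | mytest/s1.py | xiaohearr
-- ===== SOURCE A (Python) =====
-- def xiaohearr(xharr):
--     if(len(xharr)==1):
--         return 0
--     arrmun=0
--     for i in range(1,len(xharr)-1):
--         for j in range(i,0,-1):
--             if xharr[j]<xharr[i]:
--                 arrmun=arrmun+xharr[j]
--     return arrmun
-- ===== SOURCE B (Python) =====
-- def _build(sz):
--     if sz == 1:
--         return [0]
--     half = sz // 2
--     return [0, _build(half), _build(sz - half)]
--
-- def _update(t, sz, i, v):
--     t[0] += v
--     if sz == 1: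
--         return
--     half = sz // 2
--     if i < half:
--         _update(t[1], half, i, v)
--     else:
--         _update(t[2], sz - half, i - half, v)
--
-- def _query(t, sz, k):
--     if k <= 0:
--         return 0
--     if k >= sz:
--         return t[0]
--     half = sz // 2
--     if k <= half:
--         return _query(t[1], half, k)
--     return t[1][0] + _query(t[2], sz - half, k - half)
--
-- def xiaohearr(xharr):
--     mid = xharr[1:len(xharr) - 1]
--     if not mid:
--         return 0
--     vals = sorted(set(mid))
--     rank = {}
--     k = 0
--     for v in vals:
--         rank[v] = k
--         k += 1
--     m = len(vals)
--     tree = _build(m)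
--     ans = 0
--     for x in mid:
--         r = rank[x]
--         ans += _query(tree, m, r)
--         _update(tree, m, r, x)
--     return ans
-- ===== Notes on version B (the rewrite author's own statement) =====
-- stated objective: faster
-- what changed: Replaced A's nested quadratic scan (for each middle index, rescan all earlier indices) by coordinate compression plus a segment tree over value ranks: one left-to-right pass querying the prefix sum of already-seen values strictly smaller than the current one, then inserting it.
import Mathlib
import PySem

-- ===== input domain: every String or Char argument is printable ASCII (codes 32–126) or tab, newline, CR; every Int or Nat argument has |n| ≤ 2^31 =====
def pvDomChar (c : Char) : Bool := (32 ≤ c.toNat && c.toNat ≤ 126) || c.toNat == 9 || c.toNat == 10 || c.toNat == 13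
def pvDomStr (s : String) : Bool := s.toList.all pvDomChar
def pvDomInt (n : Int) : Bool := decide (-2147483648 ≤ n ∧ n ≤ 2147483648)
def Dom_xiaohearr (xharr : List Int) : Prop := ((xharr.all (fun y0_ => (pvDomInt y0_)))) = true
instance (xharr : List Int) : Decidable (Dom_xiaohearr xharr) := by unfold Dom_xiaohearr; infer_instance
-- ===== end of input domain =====

-- B is a different algorithm: coordinate compression + a segment tree over value ranks
-- (one pass, prefix-sum query of smaller seen values) instead of A's quadratic rescan; faster (asymptotic).

-- ===== PORT A =====
def xiaohearr (xharr : List Int) : Int :=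
  if xharr.length == 1 then 0
  else
    (PySem.List.pyRange 1 ((xharr.length : Int) - 1)).foldl
      (fun arrmun i =>
        (PySem.List.pyRange i 0 (-1)).foldl
          (fun arrmun j =>
            if PySem.List.pyGetD xharr j 0 < PySem.List.pyGetD xharr i 0 then
              arrmun + PySem.List.pyGetD xharr j 0
            else arrmun)
          arrmun)
      0

-- ===== PORT B =====
-- segment tree node: stored subtree sum, children (Python: [s] leaf / [s, left, right])
inductive PvSegT : Type
  | leaf : Int → PvSegT
  | node : Int → PvSegT → PvSegT → PvSegT
deriving DecidableEq, Repr

-- _build(sz): the 'sz ≤ 1' guard (Python tests sz == 1) only makes the recursion total;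
-- B never calls it with sz < 1.
def pvBuild (sz : Int) : PvSegT :=
  if sz ≤ 1 then .leaf 0
  else
    let half := PySem.Int.floordiv sz 2
    .node 0 (pvBuild half) (pvBuild (sz - half))
termination_by sz.toNat
decreasing_by
  all_goals
    rw [PySem.Int.floordiv_eq_ediv_of_pos (by norm_num : (0:Int) < 2)]
    omega

-- t[0]
def pvSum : PvSegT → Int
  | .leaf s => s
  | .node s _ _ => s

-- _update(t, sz, i, v); the leaf/node match is Python's 'sz == 1' test (list of length 1 vs 3)
def pvUpdate : PvSegT → Int → Int → Int → PvSegT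
  | .leaf s, _, _, v => .leaf (s + v)
  | .node s l r, sz, i, v =>
    let half := PySem.Int.floordiv sz 2
    if i < half then .node (s + v) (pvUpdate l half i v) r
    else .node (s + v) l (pvUpdate r (sz - half) (i - half) v)

-- _query(t, sz, k)
def pvQuery : PvSegT → Int → Int → Int
  | .leaf s, sz, k => if k ≤ 0 then 0 else if k ≥ sz then s else s
  | .node s l r, sz, k =>
    if k ≤ 0 then 0
    else if k ≥ sz then s
    else
      let half := PySem.Int.floordiv sz 2
      if k ≤ half then pvQuery l half k
      else pvSum l + pvQuery r (sz - half) (k - half)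

-- rank[x] is always present (x ∈ vals); the Python lookup is ported with default 0
def xiaohearr_alt (xharr : List Int) : Int :=
  let mid := PySem.List.slice xharr (some 1) (some ((xharr.length : Int) - 1))
  if mid = [] then 0
  else
    let vals := PySem.List.sorted (PySem.Set.ofList mid) (fun x => x)
    let rk := (vals.foldl (fun (p : PySem.Dict Int Int × Int) v => (p.1.insert v p.2, p.2 + 1))
      (PySem.Dict.empty, (0 : Int))).1
    let m := (vals.length : Int)
    let tree := pvBuild m
    (mid.foldl
      (fun (p : Int × PvSegT) x =>
        let r := PySem.Dict.getD rk x 0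
        (p.1 + pvQuery p.2 m r, pvUpdate p.2 m r x))
      (0, tree)).1

-- ===== PRECONDITION & SPEC =====
def Spec_xiaohearr (xharr : List Int) (out : Int) : Prop := out = xiaohearr_alt xharr
instance (xharr : List Int) (out : Int) : Decidable (Spec_xiaohearr xharr out) := by unfold Spec_xiaohearr; infer_instance

-- ===== CLAIM (what is proved, stated in full; the proofs are below) =====
def Claim_equal_xiaohearr : Prop := ∀ (xharr : List Int), Dom_xiaohearr xharr → Spec_xiaohearr xharr (xiaohearr xharr)

-- ===== LEMMAS AND PROOFS =====

-- the common specification: sum over middle positions of earlier strictly smaller middle values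
def pvRS : List Int → List Int → Int
  | _, [] => 0
  | pre, x :: rest => (pre.filter (fun a => decide (a < x))).sum + pvRS (pre ++ [x]) rest

lemma pvRS_eq (rest : List Int) : ∀ pre : List Int,
    pvRS pre rest =
      ((List.range rest.length).map
        (fun t => ((pre ++ rest.take t).filter (fun a => decide (a < rest.getD t 0))).sum)).sum := by
  induction rest with
  | nil => intro pre; simp [pvRS]
  | cons x rs ih =>
    intro pre
    rw [pvRS, ih]
    simp only [List.length_cons, List.range_succ_eq_map, List.map_cons, List.map_map, List.sum_cons]
    congr 1
    · simp
    · congr 1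
      apply List.map_congr_left
      intro t ht
      simp only [Function.comp_apply, List.take_succ_cons, List.getD_cons_succ, List.append_assoc, List.singleton_append]

-- fold-with-guard is a filtered sum
lemma pvFoldlIf {β : Type} (l : List β) (f : β → Int) (c : Int) :
    ∀ acc : Int,
      l.foldl (fun a x => if f x < c then a + f x else a) acc
        = acc + ((l.map f).filter (fun a => decide (a < c))).sum := by
  induction l with
  | nil => intro acc; simp
  | cons x xs ih =>
    intro acc
    simp only [List.foldl_cons, List.map_cons, List.filter_cons]
    by_cases h : f x < c <;> simp [h, ih] <;> ring

-- shape of a well-built tree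
def PvShape : PvSegT → Int → Prop
  | .leaf _, sz => sz = 1
  | .node _ l r, sz =>
      2 ≤ sz ∧ PvShape l (PySem.Int.floordiv sz 2) ∧ PvShape r (sz - PySem.Int.floordiv sz 2)

def PvAllZ : PvSegT → Prop
  | .leaf s => s = 0
  | .node s l r => s = 0 ∧ PvAllZ l ∧ PvAllZ r

lemma pvHalf_facts {sz : Int} (h : 2 ≤ sz) :
    1 ≤ PySem.Int.floordiv sz 2 ∧ PySem.Int.floordiv sz 2 < sz := by
  rw [PySem.Int.floordiv_eq_ediv_of_pos (by norm_num : (0:Int) < 2)]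
  omega

lemma pvBuild_shape (sz : Int) (h : 1 ≤ sz) : PvShape (pvBuild sz) sz := by
  rw [pvBuild]
  by_cases h1 : sz ≤ 1
  · simp only [h1, if_true]
    have : sz = 1 := le_antisymm h1 h
    simp [PvShape, this]
  · simp only [h1, if_false]
    have h2 : 2 ≤ sz := by omega
    obtain ⟨hf1, hf2⟩ := pvHalf_facts h2
    exact ⟨h2, pvBuild_shape _ hf1, pvBuild_shape _ (by omega)⟩
termination_by sz.toNat
decreasing_by
  all_goals
    rw [PySem.Int.floordiv_eq_ediv_of_pos (by norm_num : (0:Int) < 2)]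
    omega

lemma pvBuild_allz (sz : Int) : PvAllZ (pvBuild sz) := by
  rw [pvBuild]
  by_cases h1 : sz ≤ 1
  · simp [h1, PvAllZ]
  · simp only [h1, if_false]
    exact ⟨rfl, pvBuild_allz _, pvBuild_allz _⟩
termination_by sz.toNat
decreasing_by
  all_goals
    rw [PySem.Int.floordiv_eq_ediv_of_pos (by norm_num : (0:Int) < 2)]
    omega

lemma pvQuery_allz (t : PvSegT) : ∀ sz k : Int, PvAllZ t → pvQuery t sz k = 0 := by
  induction t with
  | leaf s => intro sz k hz; simp only [PvAllZ] at hz; simp [pvQuery, hz]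
  | node s l r ihl ihr =>
    intro sz k hz
    obtain ⟨hs, hl, hr⟩ := hz
    have hsl : pvSum l = 0 := by cases l <;> simp_all [pvSum, PvAllZ]
    simp only [pvQuery, hs]
    split_ifs <;> simp [ihl _ _ hl, ihr _ _ hr, hsl]

lemma pvSum_update (t : PvSegT) : ∀ sz i v : Int, pvSum (pvUpdate t sz i v) = pvSum t + v := by
  induction t with
  | leaf s => intro sz i v; simp [pvUpdate, pvSum]
  | node s l r ihl ihr =>
    intro sz i v
    simp only [pvUpdate]
    split_ifs <;> simp [pvSum]

lemma pvUpdate_shape (t : PvSegT) : ∀ sz i v : Int, PvShape t sz → 0 ≤ i → i < sz →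
    PvShape (pvUpdate t sz i v) sz := by
  induction t with
  | leaf s => intro sz i v hS h0 h1; simpa [pvUpdate, PvShape] using hS
  | node s l r ihl ihr =>
    intro sz i v hS h0 h1
    obtain ⟨h2, hl, hr⟩ := hS
    obtain ⟨hf1, hf2⟩ := pvHalf_facts h2
    simp only [pvUpdate]
    split_ifs with hi
    · exact ⟨h2, ihl _ _ v hl h0 hi, hr⟩
    · exact ⟨h2, hl, ihr _ _ v hr (by omega) (by omega)⟩

lemma pvQuery_update (t : PvSegT) : ∀ sz i v k : Int, PvShape t sz → 0 ≤ i → i < sz →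
    pvQuery (pvUpdate t sz i v) sz k = pvQuery t sz k + (if i < k then v else 0) := by
  induction t with
  | leaf s =>
    intro sz i v k hS h0 h1
    simp only [PvShape] at hS
    subst hS
    have : i = 0 := by omega
    subst this
    simp only [pvUpdate, pvQuery]
    split_ifs <;> first | rfl | omega
  | node s l r ihl ihr =>
    intro sz i v k hS h0 h1
    obtain ⟨h2, hl, hr⟩ := hS
    obtain ⟨hf1, hf2⟩ := pvHalf_facts h2
    simp only [pvUpdate]
    by_cases hi : i < PySem.Int.floordiv sz 2
    · -- update went left (i < half)
      rw [if_pos hi]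
      by_cases hk0 : k ≤ 0
      · have hik : ¬ i < k := by omega
        simp [pvQuery, hk0, hik]
      · by_cases hksz : k ≥ sz
        · have hik : i < k := by omega
          simp [pvQuery, hk0, hksz, hik]
        · by_cases hkh : k ≤ PySem.Int.floordiv sz 2
          · simp only [pvQuery, if_neg hk0, if_neg hksz, if_pos hkh]
            exact ihl _ _ v _ hl h0 hi
          · simp only [pvQuery, if_neg hk0, if_neg hksz, if_neg hkh]
            rw [pvSum_update l]
            have hik : i < k := by omega
            simp only [if_pos hik]
            ring
    · -- update went right (i ≥ half)
      rw [if_neg hi]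
      by_cases hk0 : k ≤ 0
      · have hik : ¬ i < k := by omega
        simp [pvQuery, hk0, hik]
      · by_cases hksz : k ≥ sz
        · have hik : i < k := by omega
          simp [pvQuery, hk0, hksz, hik]
        · by_cases hkh : k ≤ PySem.Int.floordiv sz 2
          · have hik : ¬ i < k := by omega
            simp only [pvQuery, if_neg hk0, if_neg hksz, if_pos hkh, if_neg hik]
            simp
          · simp only [pvQuery, if_neg hk0, if_neg hksz, if_neg hkh]
            rw [ihr _ _ v _ hr (by omega) (by omega)]
            by_cases hik : i < k
            · rw [if_pos (show i - PySem.Int.floordiv sz 2 < k - PySem.Int.floordiv sz 2 by omega),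
                if_pos hik]
              ring
            · rw [if_neg (show ¬ (i - PySem.Int.floordiv sz 2 < k - PySem.Int.floordiv sz 2) by omega),
                if_neg hik]
              ring

-- B's main loop invariant
lemma pvB_loop (ρ : Int → Int) (m : Int) (rest : List Int) :
    ∀ (pre : List Int) (acc : Int) (t : PvSegT),
      PvShape t m →
      (∀ k, pvQuery t m k = ((pre.filter (fun a => decide (ρ a < k))).sum)) →
      (∀ x ∈ rest, 0 ≤ ρ x ∧ ρ x < m) →
      (∀ a ∈ pre ++ rest, ∀ b ∈ pre ++ rest, (a < b ↔ ρ a < ρ b)) →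
      (rest.foldl
        (fun (p : Int × PvSegT) x => (p.1 + pvQuery p.2 m (ρ x), pvUpdate p.2 m (ρ x) x))
        (acc, t)).1
        = acc + pvRS pre rest := by
  induction rest with
  | nil => intro pre acc t _ _ _ _; simp [pvRS]
  | cons x rs ih =>
    intro pre acc t hS hq hbound hmono
    have hbx := hbound x (by simp)
    have hmem : ∀ y : Int, y ∈ (pre ++ [x]) ++ rs → y ∈ pre ++ x :: rs := by
      intro y hy; simp at hy ⊢; tauto
    simp only [List.foldl_cons]
    rw [ih (pre ++ [x]) (acc + pvQuery t m (ρ x)) (pvUpdate t m (ρ x) x)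
      (pvUpdate_shape t m (ρ x) x hS hbx.1 hbx.2)
      (fun k => by
        rw [pvQuery_update t m (ρ x) x k hS hbx.1 hbx.2, hq k, List.filter_append,
          List.sum_append]
        congr 1
        by_cases hc : ρ x < k <;> simp [hc])
      (fun y hy => hbound y (List.mem_cons_of_mem x hy))
      (fun a ha b hb => hmono a (hmem a ha) b (hmem b hb))]
    have hquery : pvQuery t m (ρ x) = (pre.filter (fun a => decide (a < x))).sum := by
      rw [hq (ρ x)]
      congr 1
      apply List.filter_congr
      intro a ha
      rw [decide_eq_decide]
      exact (hmono a (by simp [ha]) x (by simp)).symm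
    rw [hquery, pvRS]
    ring

-- the rank dictionary computes idxOf into vals
lemma pvRank_fold_get?_not_mem (vs : List Int) (x : Int) :
    ∀ (d : PySem.Dict Int Int) (k : Int), x ∉ vs →
      ((vs.foldl (fun (p : PySem.Dict Int Int × Int) v => (p.1.insert v p.2, p.2 + 1)) (d, k)).1).get? x
        = d.get? x := by
  induction vs with
  | nil => intro d k _; rfl
  | cons v vs ih =>
    intro d k hx
    simp only [List.foldl_cons]
    rw [ih (d.insert v k) (k + 1) (fun h => hx (List.mem_cons_of_mem _ h))]
    exact PySem.Dict.get?_insert_of_ne d k (fun h => hx (by simp [h]))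

lemma pvRank_getD (vals : List Int) (x : Int) :
    ∀ (d : PySem.Dict Int Int) (k : Int), vals.Nodup → x ∈ vals →
      PySem.Dict.getD
        ((vals.foldl (fun (p : PySem.Dict Int Int × Int) v => (p.1.insert v p.2, p.2 + 1)) (d, k)).1) x 0
        = k + (vals.idxOf x : Int) := by
  induction vals with
  | nil => intro d k _ hx; simp at hx
  | cons v vs ih =>
    intro d k hnd hx
    rw [List.nodup_cons] at hnd
    by_cases hxv : x = v
    · subst hxv
      simp only [List.foldl_cons]
      have hg : ((vs.foldl (fun (p : PySem.Dict Int Int × Int) v => (p.1.insert v p.2, p.2 + 1))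
          (d.insert x k, k + 1)).1).get? x = some k := by
        rw [pvRank_fold_get?_not_mem vs x (d.insert x k) (k + 1) hnd.1]
        exact PySem.Dict.get?_insert_self d x k
      show (((vs.foldl (fun (p : PySem.Dict Int Int × Int) v => (p.1.insert v p.2, p.2 + 1))
          (d.insert x k, k + 1)).1).get? x).getD 0 = _
      rw [hg]
      simp [List.idxOf_cons]
    · have hx' : x ∈ vs := by
        rcases List.mem_cons.mp hx with h | h
        · exact absurd h hxv
        · exact h
      simp only [List.foldl_cons]
      rw [ih (d.insert v k) (k + 1) hnd.2 hx']
      have : (v :: vs).idxOf x = vs.idxOf x + 1 := by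
        simp [List.idxOf_cons, Ne.symm hxv]
      rw [this]
      push_cast
      ring

lemma pvIdxOf_lt_iff (vals : List Int) (hp : vals.Pairwise (· < ·)) (a b : Int)
    (ha : a ∈ vals) (hb : b ∈ vals) : a < b ↔ vals.idxOf a < vals.idxOf b := by
  have hal := List.idxOf_lt_length_of_mem ha
  have hbl := List.idxOf_lt_length_of_mem hb
  have hga : vals[vals.idxOf a] = a := List.getElem_idxOf hal
  have hgb : vals[vals.idxOf b] = b := List.getElem_idxOf hbl
  have key := List.pairwise_iff_getElem.mp hp
  constructor
  · intro hab
    by_contra hle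
    push_neg at hle
    rcases lt_or_eq_of_le hle with hlt | heq
    · have := key _ _ hbl hal hlt
      rw [hga, hgb] at this
      omega
    · have h2 : a = b := by
        rw [← hga, ← hgb]
        exact getElem_congr rfl heq.symm hal
      omega
  · intro hij
    have := key _ _ hal hbl hij
    rw [hga, hgb] at this
    exact this

lemma pvMapRange (xs : List Int) (i : Int) (h1 : 0 < i) (h2 : i + 1 ≤ (xs.length : Int)) :
    (PySem.List.pyRange 1 (i + 1)).map (fun j => PySem.List.pyGetD xs j 0)
      = (xs.drop 1).take i.toNat := by
  apply List.ext_getElem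
  · simp only [PySem.List.length_pyRange_one, List.length_map, List.length_take,
      List.length_drop]
    omega
  · intro k hk1 hk2
    simp only [PySem.List.length_pyRange_one, List.length_map] at hk1
    simp only [List.getElem_map, PySem.List.getElem_pyRange_one]
    rw [PySem.List.pyGetD_eq_getElem xs 0 (by omega) (by omega)]
    rw [List.getElem_take, List.getElem_drop]
    exact getElem_congr rfl (by omega) (by omega)

lemma pvMidLen (xs : List Int) :
    (PySem.List.slice xs (some 1) (some ((xs.length : Int) - 1))).length = xs.length - 2 := by
  rw [PySem.List.length_slice]
  rcases Nat.eq_zero_or_pos xs.length with h | h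
  · rw [h]; decide
  · have hb : ((xs.length : Int) - 1) = ((xs.length - 1 : Nat) : Int) := by omega
    have ha : (1 : Int) = ((1 : Nat) : Int) := by norm_num
    rw [hb, ha, PySem.List.clampIdx_natCast, PySem.List.clampIdx_natCast]
    omega

lemma pvMid_eq (xs : List Int) (h : 1 ≤ xs.length) :
    PySem.List.slice xs (some 1) (some ((xs.length : Int) - 1))
      = (xs.drop 1).take (xs.length - 2) := by
  have hb : ((xs.length : Int) - 1) = ((xs.length - 1 : Nat) : Int) := by omega
  have ha : (1 : Int) = ((1 : Nat) : Int) := by norm_num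
  rw [hb, ha, PySem.List.slice_natCast]
  have hc : xs.length - 1 - 1 = xs.length - 2 := by omega
  rw [hc]

lemma pvInner (xs : List Int) (h3 : 3 ≤ xs.length) (k : Nat) (hk : k < xs.length - 2) :
    ∀ acc : Int,
      (PySem.List.pyRange (1 + (k : Int)) 0 (-1)).foldl
        (fun a j =>
          if PySem.List.pyGetD xs j 0 < PySem.List.pyGetD xs (1 + (k : Int)) 0 then
            a + PySem.List.pyGetD xs j 0
          else a) acc
      = acc + ((((xs.drop 1).take (xs.length - 2)).take k).filter
          (fun a => decide (a < ((xs.drop 1).take (xs.length - 2)).getD k 0))).sum := by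
  intro acc
  have hmidlen : ((xs.drop 1).take (xs.length - 2)).length = xs.length - 2 := by
    simp
    omega
  have hkm : k < ((xs.drop 1).take (xs.length - 2)).length := by omega
  rw [pvFoldlIf]
  congr 1
  rw [PySem.List.pyRange_neg_one_eq_reverse, List.map_reverse, List.filter_reverse,
    List.sum_reverse]
  have h01 : (0 : Int) + 1 = 1 := by norm_num
  rw [h01, pvMapRange xs (1 + (k : Int)) (by omega) (by omega)]
  have htn : ((1 : Int) + (k : Int)).toNat = k + 1 := by omega
  rw [htn]
  have htake : (xs.drop 1).take (k + 1) = ((xs.drop 1).take (xs.length - 2)).take (k + 1) := by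
    rw [List.take_take]
    congr 1
    omega
  rw [htake]
  rw [List.take_add_one]
  have hsome : ((xs.drop 1).take (xs.length - 2))[k]? = some ((xs.drop 1).take (xs.length - 2))[k] :=
    List.getElem?_eq_getElem hkm
  rw [hsome]
  have hpivot : PySem.List.pyGetD xs (1 + (k : Int)) 0 = ((xs.drop 1).take (xs.length - 2))[k] := by
    rw [PySem.List.pyGetD_eq_getElem xs 0 (by omega) (by omega)]
    rw [List.getElem_take, List.getElem_drop]
    exact getElem_congr rfl (by omega) (by omega)
  have hgetD : ((xs.drop 1).take (xs.length - 2)).getD k 0 = ((xs.drop 1).take (xs.length - 2))[k] :=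
    List.getD_eq_getElem _ _ hkm
  rw [hpivot, hgetD, Option.toList_some, List.filter_append, List.sum_append]
  have hlast : (List.filter (fun a => decide (a < ((xs.drop 1).take (xs.length - 2))[k]))
      [((xs.drop 1).take (xs.length - 2))[k]]) = [] := by
    simp
  rw [hlast]
  simp

lemma pvA_eq (xs : List Int) (h3 : 3 ≤ xs.length) :
    xiaohearr xs = ((List.range (xs.length - 2)).map
      (fun t => ((((xs.drop 1).take (xs.length - 2)).take t).filter
        (fun a => decide (a < ((xs.drop 1).take (xs.length - 2)).getD t 0))).sum)).sum := by
  unfold xiaohearr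
  rw [if_neg (by simp; omega)]
  refine Eq.trans (PySem.List.foldl_congr_mem (PySem.List.pyRange 1 ((xs.length : Int) - 1)) _
    (fun (acc : Int) (i : Int) => acc +
      ((((xs.drop 1).take (xs.length - 2)).take (i.toNat - 1)).filter
        (fun a => decide (a < ((xs.drop 1).take (xs.length - 2)).getD (i.toNat - 1) 0))).sum) 0
    ?_) ?_
  · intro acc i hi
    obtain ⟨h1, h2⟩ := (PySem.List.mem_pyRange_one (x := i)).mp hi
    set k := i.toNat - 1 with hk
    rw [show i = 1 + (k : Int) by omega]
    beta_reduce
    have hc2 : ((1 : Int) + (k : Int)).toNat - 1 = k := by omega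
    rw [hc2]
    exact pvInner xs h3 k (by omega) acc
  · rw [PySem.List.foldl_add, zero_add]
    have hc : ((xs.length : Int) - 1 - 1).toNat = xs.length - 2 := by omega
    rw [PySem.List.pyRange_one, hc, List.map_map]
    congr 1
    apply List.map_congr_left
    intro k hk
    simp only [Function.comp_apply]
    have hc2 : ((1 : Int) + (k : Int)).toNat - 1 = k := by omega
    rw [hc2]

lemma pvB_eq (xs : List Int) (h3 : 3 ≤ xs.length) :
    xiaohearr_alt xs = pvRS [] ((xs.drop 1).take (xs.length - 2)) := by
  have hmid := pvMid_eq xs (by omega)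
  have hlen : ((xs.drop 1).take (xs.length - 2)).length = xs.length - 2 := by
    simp
    omega
  have hne : (xs.drop 1).take (xs.length - 2) ≠ [] := by
    intro h
    have := congrArg List.length h
    rw [hlen] at this
    simp at this
    omega
  simp only [xiaohearr_alt, hmid, if_neg hne]
  set mid := (xs.drop 1).take (xs.length - 2) with hmiddef
  set vals := PySem.List.sorted (PySem.Set.ofList mid) (fun x => x) with hvals
  set rk := (vals.foldl (fun (p : PySem.Dict Int Int × Int) v => (p.1.insert v p.2, p.2 + 1))
    (PySem.Dict.empty, (0 : Int))).1 with hrk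
  have hvp : vals.Pairwise (· < ·) := PySem.List.sorted_ofList_pairwise_lt mid
  have hnd : vals.Nodup := hvp.imp ne_of_lt
  have hmemv : ∀ x ∈ mid, x ∈ vals := fun x hx =>
    (PySem.List.mem_sorted _ _ _ x).mpr ((PySem.Set.mem_ofList mid x).mpr hx)
  have hvne : vals ≠ [] := by
    intro h
    rcases List.exists_mem_of_ne_nil _ hne with ⟨y, hy⟩
    exact absurd (hmemv y hy) (by rw [h]; simp)
  have hρ : ∀ x ∈ mid, PySem.Dict.getD rk x 0 = (vals.idxOf x : Int) := by
    intro x hx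
    rw [hrk, pvRank_getD vals x PySem.Dict.empty 0 hnd (hmemv x hx)]
    ring
  have hmpos : 1 ≤ (vals.length : Int) := by
    have := List.length_pos_of_ne_nil hvne
    omega
  have h := pvB_loop (fun x => PySem.Dict.getD rk x 0) (vals.length : Int) mid [] 0
    (pvBuild (vals.length : Int))
    (pvBuild_shape _ hmpos)
    (fun k => by
      rw [pvQuery_allz _ _ _ (pvBuild_allz _)]
      simp)
    (fun x hx => by
      simp only [hρ x hx]
      constructor
      · omega
      · have := List.idxOf_lt_length_of_mem (hmemv x hx)
        omega)
    (fun a ha b hb => by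
      simp only [List.nil_append] at ha hb
      simp only [hρ a ha, hρ b hb]
      rw [pvIdxOf_lt_iff vals hvp a b (hmemv a ha) (hmemv b hb)]
      omega)
  rw [zero_add] at h
  exact h

-- ===== VERDICT (by name: the statement is the Claim_ definition above) =====
theorem xiaohearr_spec : Claim_equal_xiaohearr := by
  intro xs _
  unfold Spec_xiaohearr
  by_cases h3 : 3 ≤ xs.length
  · have hlen : ((xs.drop 1).take (xs.length - 2)).length = xs.length - 2 := by
      simp
      omega
    rw [pvA_eq xs h3, pvB_eq xs h3, pvRS_eq]
    rw [hlen]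
    simp
  · have hmid0 : PySem.List.slice xs (some 1) (some ((xs.length : Int) - 1)) = [] := by
      apply List.eq_nil_of_length_eq_zero
      rw [pvMidLen]
      omega
    have hB : xiaohearr_alt xs = 0 := by
      simp [xiaohearr_alt, hmid0]
    rw [hB]
    by_cases hl1 : xs.length = 1
    · simp [xiaohearr, hl1]
    · unfold xiaohearr
      rw [if_neg (by simp [hl1])]
      rw [PySem.List.pyRange_one_eq_nil (by omega)]
      rfl
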